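-- pv_equiv track=rewrite | github.com/madSUNitist/noteblock-music-compression | nbslim/sia_family/sweepline.py | exact_match_pattern
-- ===== SOURCE A (Python) =====
-- from typing import List, Tuple, Set
--
-- def exact_match_pattern(
--     dataset: List[Tuple[int, int]],
--     pattern: List[Tuple[int, int]],
--     restrict_dpitch_zero: bool = False,
-- ) -> Set[Tuple[int, int]]:
--     """
--     Finds all translation vectors `w` such that `pattern + w` is entirely contained in `dataset`.
--
--     **IMPORTANT**: `dataset` MUST be lexicographically sorted by `(tick, pitch)` in ascending order.
--     The same applies to `pattern`. Passing an unsorted list leads to incorrect results.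
--
--     Implements Ukkonen et al. Algorithm 1 (sweepline exact matching).
--
--     Args:
--         dataset: A **lexicographically sorted** list of points `(tick, pitch)`.
--         pattern: A **lexicographically sorted** list of points forming the pattern.
--         restrict_dpitch_zero: If `True`, only translations with zero pitch difference are returned.
--
--     Returns:
--         A set of non‑zero translation vectors `(dtick, dpitch)` that map the pattern into the dataset.
--     """
--     # Optional debug checks (can be removed in production)
--     assert all(dataset[i] <= dataset[i + 1] for i in range(len(dataset) - 1)), \
--         "dataset must be lexicographically sorted"
--     assert all(pattern[i] <= pattern[i + 1] for i in range(len(pattern) - 1)), \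
--         "pattern must be lexicographically sorted"
--
--     m = len(pattern)
--     n = len(dataset)
--     if m < 2 or n < m:
--         return set()
--
--     # q[i] holds the next candidate index in dataset for pattern[i]
--     q = [0] * m
--     p0_tick, p0_pitch = pattern[0]
--     translators = set()
--
--     # Main loop: only consider dataset points that can possibly be the image of pattern[0]
--     for j in range(n - m + 1):
--         tj, pj = dataset[j]
--         if restrict_dpitch_zero and pj != p0_pitch:
--             continue
--
--         f = (tj - p0_tick, pj - p0_pitch)
--         if f == (0, 0) or (restrict_dpitch_zero and f[1] != 0):
--             continue
--
--         # q[0] should be at least j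
--         q[0] = max(q[0], j)
--         matched = True
--
--         for idx in range(1, m):
--             # target point = pattern[idx] + f
--             target = (
--                 pattern[idx][0] + f[0],
--                 pattern[idx][1] + f[1],
--             )
--             # Advance pointer to the first dataset point >= target
--             ptr = max(q[idx], q[idx - 1])
--             while ptr < n and dataset[ptr] < target:
--                 ptr += 1
--             q[idx] = ptr
--             if ptr >= n or dataset[ptr] != target:
--                 matched = False
--                 break
--
--         if matched:
--             translators.add(f)
--
--     return translators
-- ===== SOURCE B (Python) =====
-- def exact_match_pattern(dataset, pattern, restrict_dpitch_zero=False):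
--     """Set-membership re-implementation: no sweepline pointer state at all."""
--     assert all(dataset[i] <= dataset[i + 1] for i in range(len(dataset) - 1)), \
--         "dataset must be lexicographically sorted"
--     assert all(pattern[i] <= pattern[i + 1] for i in range(len(pattern) - 1)), \
--         "pattern must be lexicographically sorted"
--
--     m = len(pattern)
--     n = len(dataset)
--     if m < 2 or n < m:
--         return set()
--
--     points = set(dataset)
--     p0_tick, p0_pitch = pattern[0]
--     translators = set()
--
--     for j in range(n - m + 1):
--         tj, pj = dataset[j]
--         if restrict_dpitch_zero and pj != p0_pitch:
--             continue
--         f = (tj - p0_tick, pj - p0_pitch)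
--         if f == (0, 0) or (restrict_dpitch_zero and f[1] != 0):
--             continue
--         if all((px + f[0], py + f[1]) in points for (px, py) in pattern[1:]):
--             translators.add(f)
--     return translators
-- ===== Notes on version B (the rewrite author's own statement) =====
-- stated objective: idiomatic
-- what changed: Replaces the sweepline's persistent pointer array q and inner while-advance over the sorted dataset by a set of dataset points built once and a direct all(...) membership test per candidate translation; no sweepline state remains.
import Mathlib
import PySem

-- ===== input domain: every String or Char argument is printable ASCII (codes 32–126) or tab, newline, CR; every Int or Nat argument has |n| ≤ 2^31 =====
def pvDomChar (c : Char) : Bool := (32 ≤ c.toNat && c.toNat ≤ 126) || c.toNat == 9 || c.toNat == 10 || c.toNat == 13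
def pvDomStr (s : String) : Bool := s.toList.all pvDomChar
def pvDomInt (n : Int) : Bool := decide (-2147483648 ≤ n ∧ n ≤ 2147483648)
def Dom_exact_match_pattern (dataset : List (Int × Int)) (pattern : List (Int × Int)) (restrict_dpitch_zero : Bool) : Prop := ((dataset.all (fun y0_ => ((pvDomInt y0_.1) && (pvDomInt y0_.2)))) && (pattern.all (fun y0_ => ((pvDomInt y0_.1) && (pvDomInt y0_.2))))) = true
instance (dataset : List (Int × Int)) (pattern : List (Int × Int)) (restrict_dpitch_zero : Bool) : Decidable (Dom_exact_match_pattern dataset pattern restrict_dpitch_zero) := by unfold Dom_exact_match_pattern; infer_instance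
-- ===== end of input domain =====

-- B replaces A's sweepline pointer array and inner while-advance by a plain
-- set-membership test against set(dataset) (idiomatic; no speed claim).
-- Both A and B raise AssertionError on unsorted input; Pre_ excludes exactly those inputs.

-- Python tuple comparison (a, b) <= (c, d) / < on int pairs
def pvLe (a b : Int × Int) : Bool := decide (a.1 < b.1) || (a.1 == b.1 && decide (a.2 ≤ b.2))
def pvLt (a b : Int × Int) : Bool := decide (a.1 < b.1) || (a.1 == b.1 && decide (a.2 < b.2))

-- ===== PORT A =====
-- the `while ptr < n and dataset[ptr] < target: ptr += 1` loop
def pvAdvance (ds : List (Int × Int)) (t : Int × Int) (ptr : Nat) : Nat :=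
  if h : ptr < ds.length ∧ pvLt (ds.getD ptr (0, 0)) t = true then pvAdvance ds t (ptr + 1)
  else ptr
termination_by ds.length - ptr
decreasing_by omega

-- the `for idx in range(1, m)` loop over the pointer array q (with early break)
def pvInner (ds pat : List (Int × Int)) (f : Int × Int) (idx : Nat) (q : List Nat) :
    List Nat × Bool :=
  if _h : idx < pat.length then
    let p := pat.getD idx (0, 0)
    let target : Int × Int := (p.1 + f.1, p.2 + f.2)
    let ptr := pvAdvance ds target (max (q.getD idx 0) (q.getD (idx - 1) 0))
    let q' := q.set idx ptr
    if ds.length ≤ ptr ∨ ds.getD ptr (0, 0) ≠ target then (q', false)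
    else pvInner ds pat f (idx + 1) q'
  else (q, true)
termination_by pat.length - idx

-- body of A's `for j in range(n - m + 1)` loop; state = (q, translators)
def pvStepA (ds pat : List (Int × Int)) (r : Bool)
    (st : List Nat × PySem.Set (Int × Int)) (j : Nat) : List Nat × PySem.Set (Int × Int) :=
  let p0 := pat.getD 0 (0, 0)
  let tp := ds.getD j (0, 0)
  if r && (tp.2 != p0.2) then st
  else
    let f : Int × Int := (tp.1 - p0.1, tp.2 - p0.2)
    if f = ((0 : Int), (0 : Int)) ∨ (r = true ∧ f.2 ≠ 0) then st
    else
      let q1 := st.1.set 0 (max (st.1.getD 0 0) j)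
      let res := pvInner ds pat f 1 q1
      if res.2 then (res.1, PySem.Set.add st.2 f) else (res.1, st.2)

def exact_match_pattern (dataset : List (Int × Int)) (pattern : List (Int × Int)) (restrict_dpitch_zero : Bool) : List (Int × Int) :=
  let m := pattern.length
  let n := dataset.length
  if m < 2 ∨ n < m then []
  else
    ((List.range (n - m + 1)).foldl (pvStepA dataset pattern restrict_dpitch_zero)
      (List.replicate m 0, PySem.Set.empty)).2

-- ===== PORT B =====
-- body of B's `for j in range(n - m + 1)` loop; state = translators only
def pvStepB (ds pat : List (Int × Int)) (r : Bool)
    (tr : PySem.Set (Int × Int)) (j : Nat) : PySem.Set (Int × Int) :=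
  let p0 := pat.getD 0 (0, 0)
  let tp := ds.getD j (0, 0)
  if r && (tp.2 != p0.2) then tr
  else
    let f : Int × Int := (tp.1 - p0.1, tp.2 - p0.2)
    if f = ((0 : Int), (0 : Int)) ∨ (r = true ∧ f.2 ≠ 0) then tr
    else if (pat.drop 1).all
        (fun p => PySem.Set.contains (PySem.Set.ofList ds) (p.1 + f.1, p.2 + f.2)) then
      PySem.Set.add tr f
    else tr

def exact_match_pattern_alt (dataset : List (Int × Int)) (pattern : List (Int × Int)) (restrict_dpitch_zero : Bool) : List (Int × Int) :=
  if pattern.length < 2 ∨ dataset.length < pattern.length then []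
  else
    (List.range (dataset.length - pattern.length + 1)).foldl
      (pvStepB dataset pattern restrict_dpitch_zero) PySem.Set.empty

-- ===== PRECONDITION & SPEC =====
-- Pre_ excludes exactly the inputs on which A's (and B's) assert raises AssertionError:
-- dataset and pattern must be lexicographically sorted.
def pvAdjSorted (xs : List (Int × Int)) : Bool :=
  (xs.zip xs.tail).all fun ab => pvLe ab.1 ab.2

def Pre_exact_match_pattern (dataset : List (Int × Int)) (pattern : List (Int × Int)) (restrict_dpitch_zero : Bool) : Prop :=
  pvAdjSorted dataset = true ∧ pvAdjSorted pattern = true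
instance (dataset : List (Int × Int)) (pattern : List (Int × Int)) (restrict_dpitch_zero : Bool) : Decidable (Pre_exact_match_pattern dataset pattern restrict_dpitch_zero) := by unfold Pre_exact_match_pattern; infer_instance

def pvWitness_exact_match_pattern : (List (Int × Int)) × (List (Int × Int)) × Bool :=
  ([(0, 0), (1, 1), (2, 2)], [(0, 0), (1, 1)], false)

def Spec_exact_match_pattern (dataset : List (Int × Int)) (pattern : List (Int × Int)) (restrict_dpitch_zero : Bool) (out : List (Int × Int)) : Prop := out = exact_match_pattern_alt dataset pattern restrict_dpitch_zero
instance (dataset : List (Int × Int)) (pattern : List (Int × Int)) (restrict_dpitch_zero : Bool) (out : List (Int × Int)) : Decidable (Spec_exact_match_pattern dataset pattern restrict_dpitch_zero out) := by unfold Spec_exact_match_pattern; infer_instance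

-- ===== CLAIM (what is proved, stated in full; the proofs are below) =====
def Claim_equal_exact_match_pattern : Prop := ∀ (dataset : List (Int × Int)) (pattern : List (Int × Int)) (restrict_dpitch_zero : Bool), Dom_exact_match_pattern dataset pattern restrict_dpitch_zero → Pre_exact_match_pattern dataset pattern restrict_dpitch_zero → Spec_exact_match_pattern dataset pattern restrict_dpitch_zero (exact_match_pattern dataset pattern restrict_dpitch_zero)

-- ===== LEMMAS AND PROOFS =====

-- order lemmas about the Bool lexicographic comparison
theorem pvLe_refl (a : Int × Int) : pvLe a a = true := by simp [pvLe]
theorem pvLt_self (a : Int × Int) : pvLt a a = false := by simp [pvLt]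
theorem pvLe_trans {a b c : Int × Int} (h1 : pvLe a b = true) (h2 : pvLe b c = true) :
    pvLe a c = true := by
  rcases a with ⟨a1, a2⟩; rcases b with ⟨b1, b2⟩; rcases c with ⟨c1, c2⟩
  simp [pvLe] at *; omega
theorem pvLe_antisymm {a b : Int × Int} (h1 : pvLe a b = true) (h2 : pvLe b a = true) :
    a = b := by
  rcases a with ⟨a1, a2⟩; rcases b with ⟨b1, b2⟩
  simp [pvLe] at *
  constructor <;> omega
theorem pvLe_not_lt {a b : Int × Int} (h : pvLe a b = true) : pvLt b a = false := by
  rcases a with ⟨a1, a2⟩; rcases b with ⟨b1, b2⟩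
  simp [pvLe, pvLt] at *; omega
theorem pvEq_of_le_not_lt {a b : Int × Int} (h1 : pvLe a b = true) (h2 : pvLt a b = false) :
    a = b := by
  rcases a with ⟨a1, a2⟩; rcases b with ⟨b1, b2⟩
  simp [pvLe, pvLt] at *
  constructor <;> omega
theorem pvLe_shift {a b c : Int × Int} (h : pvLe a b = true) :
    pvLe (a.1 + c.1, a.2 + c.2) (b.1 + c.1, b.2 + c.2) = true := by
  rcases a with ⟨a1, a2⟩; rcases b with ⟨b1, b2⟩
  simp [pvLe] at *; omega
theorem pvLe_shift_left {a b c : Int × Int} (h : pvLe a b = true) :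
    pvLe (c.1 + a.1, c.2 + a.2) (c.1 + b.1, c.2 + b.2) = true := by
  rcases a with ⟨a1, a2⟩; rcases b with ⟨b1, b2⟩
  simp [pvLe] at *; omega
theorem pvLe_sub {a b c : Int × Int} (h : pvLe a b = true) :
    pvLe (a.1 - c.1, a.2 - c.2) (b.1 - c.1, b.2 - c.2) = true := by
  rcases a with ⟨a1, a2⟩; rcases b with ⟨b1, b2⟩
  simp [pvLe] at *; omega

-- sortedness, as a statement about indexed access
def PvSorted (xs : List (Int × Int)) : Prop :=
  ∀ k k' : Nat, k ≤ k' → k' < xs.length → pvLe (xs.getD k (0, 0)) (xs.getD k' (0, 0)) = true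

theorem pvPairwise_of_adj : ∀ xs : List (Int × Int), pvAdjSorted xs = true →
    List.Pairwise (fun a b : Int × Int => pvLe a b = true) xs := by
  intro xs
  induction xs with
  | nil => intro _; exact List.Pairwise.nil
  | cons a t ih =>
    cases t with
    | nil => intro _; simp
    | cons b t2 =>
      intro h
      have h' : pvLe a b = true ∧ pvAdjSorted (b :: t2) = true := by
        simpa [pvAdjSorted] using h
      have hp2 := ih h'.2
      refine List.Pairwise.cons ?_ hp2
      intro x hx
      rcases List.mem_cons.mp hx with rfl | hx2
      · exact h'.1
      · exact pvLe_trans h'.1 (List.rel_of_pairwise_cons hp2 hx2)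

theorem pvSorted_of_adj {xs : List (Int × Int)}
    (h : pvAdjSorted xs = true) : PvSorted xs := by
  intro k k' hkk hk'
  have hp := pvPairwise_of_adj xs h
  rcases Nat.eq_or_lt_of_le hkk with rfl | hlt
  · exact pvLe_refl _
  · have hk : k < xs.length := lt_trans hlt hk'
    rw [List.getD_eq_getElem _ _ hk, List.getD_eq_getElem _ _ hk']
    exact List.pairwise_iff_getElem.mp hp k k' hk hk' hlt

theorem pvGetD_set_self {q : List Nat} {i v : Nat} (h : i < q.length) :
    (q.set i v).getD i 0 = v := by
  simp [List.getD_eq_getElem?_getD, h]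

theorem pvGetD_set_ne {q : List Nat} {i j v : Nat} (h : i ≠ j) :
    (q.set i v).getD j 0 = q.getD j 0 := by
  simp [List.getD_eq_getElem?_getD, h]

theorem pvGetD_replicate_zero {n i : Nat} : (List.replicate n (0 : Nat)).getD i 0 = 0 := by
  simp [List.getD_eq_getElem?_getD, List.getElem?_replicate]
  split <;> rfl

-- occurrence of a value at or after an index
def OccFrom (ds : List (Int × Int)) (s : Nat) (v : Int × Int) : Prop :=
  ∃ k, s ≤ k ∧ k < ds.length ∧ ds.getD k (0, 0) = v

-- pointer invariant: no occurrence of any value ≥ t is lost to the left of s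
def InvAt (ds : List (Int × Int)) (s : Nat) (t : Int × Int) : Prop :=
  ∀ v ∈ ds, pvLe t v = true → OccFrom ds s v

theorem InvAt_zero (ds : List (Int × Int)) (t : Int × Int) : InvAt ds 0 t := by
  intro v hv _
  obtain ⟨k, hk, hk2⟩ := List.mem_iff_getElem.mp hv
  exact ⟨k, Nat.zero_le _, hk, by rw [List.getD_eq_getElem _ _ hk]; exact hk2⟩

theorem InvAt_mono {ds : List (Int × Int)} {s : Nat} {t t' : Int × Int}
    (hle : pvLe t t' = true) (h : InvAt ds s t) : InvAt ds s t' :=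
  fun v hv hv' => h v hv (pvLe_trans hle hv')

theorem InvAt_max {ds : List (Int × Int)} {a b : Nat} {t : Int × Int}
    (ha : InvAt ds a t) (hb : InvAt ds b t) : InvAt ds (max a b) t := by
  intro v hv hle
  obtain ⟨k1, hk1a, hk1l, hk1v⟩ := ha v hv hle
  obtain ⟨k2, hk2b, hk2l, hk2v⟩ := hb v hv hle
  rcases Nat.le_total k1 k2 with h | h
  · exact ⟨k2, by omega, hk2l, hk2v⟩
  · exact ⟨k1, by omega, hk1l, hk1v⟩

theorem InvAt_self {ds : List (Int × Int)} (hs : PvSorted ds) {j : Nat} (hj : j < ds.length) :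
    InvAt ds j (ds.getD j (0, 0)) := by
  intro v hv hle
  obtain ⟨k, hk, hk2⟩ := List.mem_iff_getElem.mp hv
  have hkd : ds.getD k (0, 0) = v := by rw [List.getD_eq_getElem _ _ hk]; exact hk2
  rcases Nat.le_total j k with h | h
  · exact ⟨k, h, hk, hkd⟩
  · have h1 : pvLe (ds.getD k (0, 0)) (ds.getD j (0, 0)) = true := hs k j h hj
    have : v = ds.getD j (0, 0) := pvLe_antisymm (by rw [hkd] at h1; exact h1) hle
    exact ⟨j, le_refl _, hj, this.symm⟩

-- pvAdvance: basic facts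
theorem pvAdvance_skipped (ds : List (Int × Int)) (t : Int × Int) (ptr : Nat) :
    ∀ k, ptr ≤ k → k < pvAdvance ds t ptr → pvLt (ds.getD k (0, 0)) t = true := by
  fun_induction pvAdvance ds t ptr with
  | case1 ptr h ih =>
    intro k hk1 hk2
    rcases Nat.eq_or_lt_of_le hk1 with rfl | hlt
    · exact h.2
    · exact ih k hlt hk2
  | case2 ptr h => intro k hk1 hk2; omega

theorem pvAdvance_le_of (ds : List (Int × Int)) (t : Int × Int) (ptr : Nat)
    {k : Nat} (hk : ptr ≤ k) (h : pvLt (ds.getD k (0, 0)) t = false) :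
    pvAdvance ds t ptr ≤ k := by
  by_contra hc
  have := pvAdvance_skipped ds t ptr k hk (by omega)
  rw [h] at this; exact Bool.false_ne_true this

theorem pvAdvance_stop (ds : List (Int × Int)) (t : Int × Int) (ptr : Nat)
    (h : pvAdvance ds t ptr < ds.length) :
    pvLt (ds.getD (pvAdvance ds t ptr) (0, 0)) t = false := by
  fun_induction pvAdvance ds t ptr with
  | case1 ptr hc ih => exact ih h
  | case2 ptr hc =>
    rcases Bool.eq_false_or_eq_true (pvLt (ds.getD ptr (0, 0)) t) with h' | h'
    · exact absurd ⟨h, h'⟩ hc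
    · exact h'

-- if an occurrence survives at or after s, pvAdvance finds the value exactly
theorem pvAdvance_find {ds : List (Int × Int)} (hs : PvSorted ds) {t : Int × Int} {s : Nat}
    (hocc : OccFrom ds s t) :
    pvAdvance ds t s < ds.length ∧ ds.getD (pvAdvance ds t s) (0, 0) = t := by
  obtain ⟨k, hks, hkl, hkv⟩ := hocc
  have hle : pvAdvance ds t s ≤ k :=
    pvAdvance_le_of ds t s hks (by rw [hkv]; exact pvLt_self t)
  have hlen : pvAdvance ds t s < ds.length := lt_of_le_of_lt hle hkl
  have h1 : pvLe (ds.getD (pvAdvance ds t s) (0, 0)) (ds.getD k (0, 0)) = true :=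
    hs _ k hle hkl
  rw [hkv] at h1
  exact ⟨hlen, pvEq_of_le_not_lt h1 (pvAdvance_stop ds t s hlen)⟩

theorem InvAt_advance {ds : List (Int × Int)} {s : Nat} {t : Int × Int}
    (h : InvAt ds s t) : InvAt ds (pvAdvance ds t s) t := by
  intro v hv hle
  obtain ⟨k, hks, hkl, hkv⟩ := h v hv hle
  refine ⟨k, ?_, hkl, hkv⟩
  by_contra hc
  have := pvAdvance_skipped ds t s k hks (by omega)
  rw [hkv] at this
  rw [pvLe_not_lt hle] at this
  exact Bool.false_ne_true this

-- the target point pattern[i] + f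
def pvTgt (pat : List (Int × Int)) (f : Int × Int) (i : Nat) : Int × Int :=
  ((pat.getD i (0, 0)).1 + f.1, (pat.getD i (0, 0)).2 + f.2)

theorem pvTgt_mono_idx {pat : List (Int × Int)} (hp : PvSorted pat) {f : Int × Int}
    {i i' : Nat} (h : i ≤ i') (h2 : i' < pat.length) :
    pvLe (pvTgt pat f i) (pvTgt pat f i') = true :=
  pvLe_shift (hp i i' h h2)

theorem pvTgt_mono_f {pat : List (Int × Int)} {f f' : Int × Int}
    (h : pvLe f f' = true) (i : Nat) :
    pvLe (pvTgt pat f i) (pvTgt pat f' i) = true := by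
  have := pvLe_shift_left (c := pat.getD i (0, 0)) h
  exact this

-- full inner-loop characterisation
theorem pvInner_spec {ds pat : List (Int × Int)} (hs : PvSorted ds) (hp : PvSorted pat)
    {f : Int × Int} :
    ∀ idx q, 1 ≤ idx → q.length = pat.length →
    (∀ i, i < pat.length → InvAt ds (q.getD i 0) (pvTgt pat f i)) →
    (pvInner ds pat f idx q).1.length = pat.length ∧
    (∀ i, i < pat.length → InvAt ds ((pvInner ds pat f idx q).1.getD i 0) (pvTgt pat f i)) ∧
    ((pvInner ds pat f idx q).2 = true ↔
      ∀ i, idx ≤ i → i < pat.length → pvTgt pat f i ∈ ds) := by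
  intro idx q
  fun_induction pvInner ds pat f idx q with
  | case1 idx q hidx p target ptr q' hif =>
    -- break at idx: target not found
    intro h1 hq hinv
    have hstart : InvAt ds (max (q.getD idx 0) (q.getD (idx - 1) 0)) (pvTgt pat f idx) := by
      refine InvAt_max (hinv idx hidx) ?_
      exact InvAt_mono (pvTgt_mono_idx hp (by omega) hidx) (hinv (idx - 1) (by omega))
    have hptr : InvAt ds ptr (pvTgt pat f idx) := InvAt_advance hstart
    have hnm : pvTgt pat f idx ∉ ds := by
      intro hmem
      have hocc : OccFrom ds (max (q.getD idx 0) (q.getD (idx - 1) 0)) (pvTgt pat f idx) :=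
        hstart _ hmem (pvLe_refl _)
      have hfind := pvAdvance_find hs hocc
      rcases hif with h | h
      · exact absurd hfind.1 (Nat.not_lt.mpr h)
      · exact h hfind.2
    refine ⟨?_, ?_, ?_⟩
    · show (q.set idx ptr).length = pat.length
      rw [List.length_set]; exact hq
    · intro i hi
      by_cases hii : idx = i
      · subst hii
        show InvAt ds ((q.set idx ptr).getD idx 0) (pvTgt pat f idx)
        rw [pvGetD_set_self (by omega)]
        exact hptr
      · show InvAt ds ((q.set idx ptr).getD i 0) (pvTgt pat f i)
        rw [pvGetD_set_ne hii]
        exact hinv i hi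
    · simp only [Bool.false_eq_true, false_iff]
      intro hall
      exact hnm (hall idx (le_refl _) hidx)
  | case2 idx q hidx p target ptr q' hif ih =>
    -- matched at idx: recurse
    intro h1 hq hinv
    have hlen : ptr < ds.length := by
      rcases Nat.lt_or_ge ptr ds.length with h | h
      · exact h
      · exact absurd (Or.inl h) hif
    have heq : ds.getD ptr (0, 0) = target := by
      by_contra hne
      exact hif (Or.inr hne)
    have hstart : InvAt ds (max (q.getD idx 0) (q.getD (idx - 1) 0)) (pvTgt pat f idx) := by
      refine InvAt_max (hinv idx hidx) ?_
      exact InvAt_mono (pvTgt_mono_idx hp (by omega) hidx) (hinv (idx - 1) (by omega))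
    have hptr : InvAt ds ptr (pvTgt pat f idx) := InvAt_advance hstart
    have hmem : pvTgt pat f idx ∈ ds := by
      show target ∈ ds
      rw [← heq, List.getD_eq_getElem _ _ hlen]
      exact List.getElem_mem _
    have hinv' : ∀ i, i < pat.length → InvAt ds (q'.getD i 0) (pvTgt pat f i) := by
      intro i hi
      by_cases hii : idx = i
      · subst hii
        show InvAt ds ((q.set idx ptr).getD idx 0) (pvTgt pat f idx)
        rw [pvGetD_set_self (by omega)]
        exact hptr
      · show InvAt ds ((q.set idx ptr).getD i 0) (pvTgt pat f i)
        rw [pvGetD_set_ne hii]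
        exact hinv i hi
    obtain ⟨hl, hv, hb⟩ := ih (by omega)
      (by show (q.set idx ptr).length = pat.length; rw [List.length_set]; exact hq) hinv'
    refine ⟨hl, hv, ?_⟩
    rw [hb]
    constructor
    · intro hall i hi1 hi2
      rcases Nat.eq_or_lt_of_le hi1 with rfl | hlt
      · exact hmem
      · exact hall i hlt hi2
    · intro hall i hi1 hi2
      exact hall i (by omega) hi2
  | case3 idx q hidx =>
    intro h1 hq hinv
    refine ⟨hq, hinv, ?_⟩
    simp only [true_iff]
    intro i hi1 hi2
    omega

-- B's membership test, characterised the same way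
theorem pvAll_iff {ds pat : List (Int × Int)} {f : Int × Int} :
    ((pat.drop 1).all
        (fun p => PySem.Set.contains (PySem.Set.ofList ds) (p.1 + f.1, p.2 + f.2)) = true ↔
      ∀ i, 1 ≤ i → i < pat.length → pvTgt pat f i ∈ ds) := by
  rw [List.all_eq_true]
  constructor
  · intro h i h1 hi
    have hd : i - 1 < (pat.drop 1).length := by
      rw [List.length_drop]; omega
    have hx : pat.getD i (0, 0) ∈ pat.drop 1 := by
      refine List.mem_iff_getElem.mpr ⟨i - 1, hd, ?_⟩
      rw [List.getElem_drop, List.getD_eq_getElem _ _ hi]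
      congr 1
      omega
    have := h _ hx
    have hmem : ((pat.getD i (0, 0)).1 + f.1, (pat.getD i (0, 0)).2 + f.2) ∈
        PySem.Set.ofList ds := by
      simpa [PySem.Set.contains, List.contains_iff_mem] using this
    exact (PySem.Set.mem_ofList ds _).mp hmem
  · intro h x hx
    obtain ⟨k, hk, hkx⟩ := List.mem_iff_getElem.mp hx
    have hk' : 1 + k < pat.length := by
      rw [List.length_drop] at hk; omega
    simp only [List.getElem_drop] at hkx
    have hxk : x = pat.getD (1 + k) (0, 0) := by
      rw [List.getD_eq_getElem _ _ hk']
      exact hkx.symm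
    have hmem := h (1 + k) (by omega) hk'
    have : (x.1 + f.1, x.2 + f.2) ∈ PySem.Set.ofList ds := by
      rw [hxk]
      exact (PySem.Set.mem_ofList ds _).mpr hmem
    simpa [PySem.Set.contains, List.contains_iff_mem] using this

-- the outer loop, in lockstep
theorem pvOuter {ds pat : List (Int × Int)} (hs : PvSorted ds) (hp : PvSorted pat)
    {r : Bool} (hm : 2 ≤ pat.length) (hnm : pat.length ≤ ds.length) :
    ∀ (b a : Nat) (q : List Nat) (tr : PySem.Set (Int × Int)),
      q.length = pat.length → a + b ≤ ds.length - pat.length + 1 →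
      (∀ i, i < pat.length →
        InvAt ds (q.getD i 0)
          (pvTgt pat ((ds.getD a (0, 0)).1 - (pat.getD 0 (0, 0)).1,
                      (ds.getD a (0, 0)).2 - (pat.getD 0 (0, 0)).2) i)) →
      ((List.range' a b).foldl (pvStepA ds pat r) (q, tr)).2 =
        (List.range' a b).foldl (pvStepB ds pat r) tr := by
  intro b
  induction b with
  | zero => intro a q tr _ _ _; rfl
  | succ b ih =>
    intro a q tr hq hab hinv
    have han : a < ds.length := by omega
    have han1 : a + 1 < ds.length := by omega
    have hfmono : pvLe
        ((ds.getD a (0, 0)).1 - (pat.getD 0 (0, 0)).1,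
         (ds.getD a (0, 0)).2 - (pat.getD 0 (0, 0)).2)
        ((ds.getD (a + 1) (0, 0)).1 - (pat.getD 0 (0, 0)).1,
         (ds.getD (a + 1) (0, 0)).2 - (pat.getD 0 (0, 0)).2) = true :=
      pvLe_sub (hs a (a + 1) (by omega) han1)
    have htrans : ∀ q2 : List Nat,
        (∀ i, i < pat.length → InvAt ds (q2.getD i 0)
          (pvTgt pat ((ds.getD a (0, 0)).1 - (pat.getD 0 (0, 0)).1,
                      (ds.getD a (0, 0)).2 - (pat.getD 0 (0, 0)).2) i)) →
        (∀ i, i < pat.length → InvAt ds (q2.getD i 0)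
          (pvTgt pat ((ds.getD (a + 1) (0, 0)).1 - (pat.getD 0 (0, 0)).1,
                      (ds.getD (a + 1) (0, 0)).2 - (pat.getD 0 (0, 0)).2) i)) :=
      fun q2 h i hi => InvAt_mono (pvTgt_mono_f hfmono i) (h i hi)
    rw [List.range'_succ, List.foldl_cons, List.foldl_cons]
    by_cases hc1 : (r && ((ds.getD a (0, 0)).2 != (pat.getD 0 (0, 0)).2)) = true
    · have hA : pvStepA ds pat r (q, tr) a = (q, tr) := by
        simp only [pvStepA]; rw [if_pos hc1]
      have hB : pvStepB ds pat r tr a = tr := by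
        simp only [pvStepB]; rw [if_pos hc1]
      rw [hA, hB]
      exact ih (a + 1) q tr hq (by omega) (htrans q hinv)
    · by_cases hc2 : (((ds.getD a (0, 0)).1 - (pat.getD 0 (0, 0)).1,
          (ds.getD a (0, 0)).2 - (pat.getD 0 (0, 0)).2) = ((0 : Int), (0 : Int)) ∨
          (r = true ∧ ((ds.getD a (0, 0)).2 - (pat.getD 0 (0, 0)).2) ≠ 0))
      · have hA : pvStepA ds pat r (q, tr) a = (q, tr) := by
          simp only [pvStepA]; rw [if_neg hc1, if_pos hc2]
        have hB : pvStepB ds pat r tr a = tr := by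
          simp only [pvStepB]; rw [if_neg hc1, if_pos hc2]
        rw [hA, hB]
        exact ih (a + 1) q tr hq (by omega) (htrans q hinv)
      · have hq0 : 0 < q.length := by omega
        have htgt0 : pvTgt pat ((ds.getD a (0, 0)).1 - (pat.getD 0 (0, 0)).1,
            (ds.getD a (0, 0)).2 - (pat.getD 0 (0, 0)).2) 0 = ds.getD a (0, 0) :=
          Prod.ext (by simp [pvTgt]) (by simp [pvTgt])
        have hinv1 : ∀ i, i < pat.length →
            InvAt ds ((q.set 0 (max (q.getD 0 0) a)).getD i 0)
              (pvTgt pat ((ds.getD a (0, 0)).1 - (pat.getD 0 (0, 0)).1,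
                          (ds.getD a (0, 0)).2 - (pat.getD 0 (0, 0)).2) i) := by
          intro i hi
          by_cases h0 : (0 : Nat) = i
          · cases h0
            rw [pvGetD_set_self hq0, htgt0]
            have h00 := hinv 0 (by omega)
            rw [htgt0] at h00
            exact InvAt_max h00 (InvAt_self hs han)
          · rw [pvGetD_set_ne h0]
            exact hinv i hi
        obtain ⟨hl, hv, hb⟩ := pvInner_spec hs hp 1 (q.set 0 (max (q.getD 0 0) a))
          (le_refl 1) (by rw [List.length_set]; exact hq) hinv1
        cases hres : (pvInner ds pat
            ((ds.getD a (0, 0)).1 - (pat.getD 0 (0, 0)).1,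
             (ds.getD a (0, 0)).2 - (pat.getD 0 (0, 0)).2) 1
            (q.set 0 (max (q.getD 0 0) a))).2 with
        | true =>
          have hall : (pat.drop 1).all (fun p => PySem.Set.contains (PySem.Set.ofList ds)
              (p.1 + ((ds.getD a (0, 0)).1 - (pat.getD 0 (0, 0)).1),
               p.2 + ((ds.getD a (0, 0)).2 - (pat.getD 0 (0, 0)).2))) = true := by
            refine (pvAll_iff (ds := ds) (pat := pat)
              (f := ((ds.getD a (0, 0)).1 - (pat.getD 0 (0, 0)).1, (ds.getD a (0, 0)).2 - (pat.getD 0 (0, 0)).2))).mpr ?_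
            intro i h1 h2
            exact (hb.mp hres) i h1 h2
          have hA : pvStepA ds pat r (q, tr) a =
              ((pvInner ds pat
                ((ds.getD a (0, 0)).1 - (pat.getD 0 (0, 0)).1,
                 (ds.getD a (0, 0)).2 - (pat.getD 0 (0, 0)).2) 1
                (q.set 0 (max (q.getD 0 0) a))).1,
               PySem.Set.add tr
                ((ds.getD a (0, 0)).1 - (pat.getD 0 (0, 0)).1,
                 (ds.getD a (0, 0)).2 - (pat.getD 0 (0, 0)).2)) := by
            simp only [pvStepA]; rw [if_neg hc1, if_neg hc2, if_pos hres]
          have hB : pvStepB ds pat r tr a =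
              PySem.Set.add tr
                ((ds.getD a (0, 0)).1 - (pat.getD 0 (0, 0)).1,
                 (ds.getD a (0, 0)).2 - (pat.getD 0 (0, 0)).2) := by
            simp only [pvStepB]; rw [if_neg hc1, if_neg hc2, if_pos hall]
          rw [hA, hB]
          exact ih (a + 1) _ _ hl (by omega) (htrans _ hv)
        | false =>
          have hall : (pat.drop 1).all (fun p => PySem.Set.contains (PySem.Set.ofList ds)
              (p.1 + ((ds.getD a (0, 0)).1 - (pat.getD 0 (0, 0)).1),
               p.2 + ((ds.getD a (0, 0)).2 - (pat.getD 0 (0, 0)).2))) = false := by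
            refine Bool.eq_false_iff.mpr ?_
            intro hh
            have := hb.mpr ((pvAll_iff (ds := ds) (pat := pat)
              (f := ((ds.getD a (0, 0)).1 - (pat.getD 0 (0, 0)).1, (ds.getD a (0, 0)).2 - (pat.getD 0 (0, 0)).2))).mp hh)
            rw [hres] at this
            exact Bool.false_ne_true this
          have hA : pvStepA ds pat r (q, tr) a =
              ((pvInner ds pat
                ((ds.getD a (0, 0)).1 - (pat.getD 0 (0, 0)).1,
                 (ds.getD a (0, 0)).2 - (pat.getD 0 (0, 0)).2) 1
                (q.set 0 (max (q.getD 0 0) a))).1, tr) := by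
            simp only [pvStepA]
            rw [if_neg hc1, if_neg hc2, if_neg (by rw [hres]; exact Bool.false_ne_true)]
          have hB : pvStepB ds pat r tr a = tr := by
            simp only [pvStepB]
            rw [if_neg hc1, if_neg hc2, if_neg (by rw [hall]; exact Bool.false_ne_true)]
          rw [hA, hB]
          exact ih (a + 1) _ _ hl (by omega) (htrans _ hv)

-- ===== VERDICT (by name: the statement is the Claim_ definition above) =====
theorem exact_match_pattern_spec : Claim_equal_exact_match_pattern := by
  intro ds pat r _ hpre
  unfold Spec_exact_match_pattern
  unfold exact_match_pattern exact_match_pattern_alt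
  by_cases hg : pat.length < 2 ∨ ds.length < pat.length
  · rw [if_pos hg, if_pos hg]
  · rw [if_neg hg, if_neg hg]
    have hg' : 2 ≤ pat.length ∧ pat.length ≤ ds.length := by
      rcases Nat.lt_or_ge pat.length 2 with h | h
      · exact absurd (Or.inl h) hg
      · rcases Nat.lt_or_ge ds.length pat.length with h2 | h2
        · exact absurd (Or.inr h2) hg
        · exact ⟨h, h2⟩
    rw [List.range_eq_range']
    exact pvOuter (pvSorted_of_adj hpre.1) (pvSorted_of_adj hpre.2) hg'.1 hg'.2
      (ds.length - pat.length + 1) 0 (List.replicate pat.length 0) PySem.Set.empty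
      (List.length_replicate) (by omega)
      (fun i hi => by rw [pvGetD_replicate_zero]; exact InvAt_zero ds _)
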